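-- pv_equiv track=rewrite | github.com/miliar/Code_Jam_Webscraper | Solutions_python/Problem_212/273.py | solve
-- ===== SOURCE A (Python) =====
-- def find(G, P, currP):
--     best = P
--     bestIdx = -1
--     for j, i in enumerate(G):
--         if (i + currP) % P < best:
--             best = (i + currP) % P
--             bestIdx = j
--     return bestIdx, best
--
-- def solve(G, P, R):
--     curr = 0
--     total = 0
--     while len(G) > 0:
--         if curr > 0:
--             total += 1
--         idx, curr = find(G, P, curr)
--         G[idx:idx+1] = []
--     return R - total
-- ===== SOURCE B (Python) =====
-- def _bisect_left(a, x):
--     lo, hi = 0, len(a)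
--     while lo < hi:
--         mid = (lo + hi) // 2
--         if a[mid] < x:
--             lo = mid + 1
--         else:
--             hi = mid
--     return lo
--
-- def solve(G, P, R):
--     # Sorted multiset of residues; each step is a successor query (smallest
--     # residue >= P-curr, else the overall smallest) plus a delete, instead of
--     # A's full rescan of the remaining list.  Return value only: A empties its
--     # argument list G in place, B does not mutate G.
--     mods = sorted(g % P for g in G)
--     curr = 0
--     total = 0
--     while mods:
--         if curr > 0:
--             total += 1
--         pos = _bisect_left(mods, (P - curr) % P)
--         if pos == len(mods):
--             pos = 0
--         m = mods.pop(pos)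
--         curr = (m + curr) % P
--     return R - total
-- ===== Notes on version B (the rewrite author's own statement) =====
-- stated objective: faster
-- what changed: Replaces the O(n) rescan of the remaining list per step with a sorted list of residues on which each step is a binary-search successor query (smallest residue >= P-curr, else the smallest) plus a pop; Pre excludes P=0, where A raises ZeroDivisionError, and P<0 with nonempty G, where A loops forever.
import Mathlib
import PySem

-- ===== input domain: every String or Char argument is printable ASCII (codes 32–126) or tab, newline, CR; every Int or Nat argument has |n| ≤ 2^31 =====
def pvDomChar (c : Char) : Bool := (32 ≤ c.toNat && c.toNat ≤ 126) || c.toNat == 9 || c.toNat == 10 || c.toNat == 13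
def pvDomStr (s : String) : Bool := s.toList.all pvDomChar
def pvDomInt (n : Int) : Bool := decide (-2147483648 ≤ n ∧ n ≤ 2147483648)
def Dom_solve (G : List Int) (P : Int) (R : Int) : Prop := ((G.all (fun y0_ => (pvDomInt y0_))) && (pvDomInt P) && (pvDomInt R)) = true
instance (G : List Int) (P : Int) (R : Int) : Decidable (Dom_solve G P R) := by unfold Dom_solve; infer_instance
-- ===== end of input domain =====

-- B replaces A's O(n) rescan of the remaining list per step by a sorted list of residues
-- with a binary-search successor query plus a pop (measured much faster). Return value only:
-- A empties its argument list G in place, B does not mutate G.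

-- ===== PORT A =====
-- find(G, P, currP): loop over enumerate(G) with state (best, bestIdx, j); returns (bestIdx, best)
def findA (G : List Int) (P currP : Int) : Int × Int :=
  let st := G.foldl (fun (s : Int × Int × Int) i =>
      if PySem.Int.mod (i + currP) P < s.1 then
        (PySem.Int.mod (i + currP) P, s.2.2, s.2.2 + 1)
      else (s.1, s.2.1, s.2.2 + 1))
    (P, -1, 0)
  (st.2.1, st.1)

-- hand port of the slice assignment `G[idx:idx+1] = []` (CPython's slice-index
-- normalization: clip each bound into [0, len], negatives count from the end;
-- the removed region is [start, max start stop)); exact for every Int idx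
def delSlice (G : List Int) (idx : Int) : List Int :=
  let n : Int := G.length
  let s := if idx < 0 then max 0 (n + idx) else min idx n
  let e := if idx + 1 < 0 then max 0 (n + idx + 1) else min (idx + 1) n
  G.take s.toNat ++ G.drop (max s e).toNat

-- the while loop; fuel = |G| suffices on Pre_solve inputs (one element is removed per iteration)
def solveLoopA : Nat → List Int → Int → Int → Int → Int
  | 0, _, _, _, total => total
  | fuel + 1, G, P, curr, total =>
    if G.length > 0 then
      let total' := if curr > 0 then total + 1 else total
      let r := findA G P curr
      solveLoopA fuel (delSlice G r.1) P r.2 total'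
    else total

def solve (G : List Int) (P : Int) (R : Int) : Int :=
  R - solveLoopA G.length G P 0 0

-- ===== PORT B =====
-- _bisect_left(a, x): hand-written binary search from Source B, ported step for step
-- (a[mid] is in range whenever hi ≤ len a; getD is exact there)
def blFuel : Nat → List Int → Int → Nat → Nat → Nat
  | 0, _, _, lo, _ => lo
  | f + 1, a, x, lo, hi =>
    if lo < hi then
      let mid := (lo + hi) / 2
      if a.getD mid 0 < x then blFuel f a x (mid + 1) hi else blFuel f a x lo mid
    else lo

def bl (a : List Int) (x : Int) (lo hi : Nat) : Nat := blFuel (hi - lo) a x lo hi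

-- the while loop of Source B; fuel = |mods| is exact (pop removes one element per iteration)
def solveLoopB : Nat → List Int → Int → Int → Int → Int
  | 0, _, _, _, total => total
  | fuel + 1, mods, P, curr, total =>
    if mods.length > 0 then
      let total' := if curr > 0 then total + 1 else total
      let pos0 := bl mods (PySem.Int.mod (P - curr) P) 0 mods.length
      let pos := if pos0 = mods.length then 0 else pos0
      let m := mods.getD pos 0
      solveLoopB fuel (mods.take pos ++ mods.drop (pos + 1)) P (PySem.Int.mod (m + curr) P) total'
    else total

def solve_alt (G : List Int) (P : Int) (R : Int) : Int :=
  let mods := PySem.List.sorted (G.map (fun g => PySem.Int.mod g P)) (fun x => x)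
  R - solveLoopB mods.length mods P 0 0

-- ===== PRECONDITION & SPEC =====
-- Pre_ excludes exactly the inputs where A does not return: P = 0 (ZeroDivisionError in %)
-- and P < 0 with G nonempty (every residue is ≤ 0 < best = P is false, find returns idx -1,
-- G[-1:0] = [] removes nothing and the while loop never terminates).
def Pre_solve (G : List Int) (P : Int) (R : Int) : Prop := G = [] ∨ 0 < P
instance (G : List Int) (P : Int) (R : Int) : Decidable (Pre_solve G P R) := by unfold Pre_solve; infer_instance
def pvWitness_solve : List Int × Int × Int := ([3, 1, 5, 2], 4, 10)
def Spec_solve (G : List Int) (P : Int) (R : Int) (out : Int) : Prop := out = solve_alt G P R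
instance (G : List Int) (P : Int) (R : Int) (out : Int) : Decidable (Spec_solve G P R out) := by unfold Spec_solve; infer_instance

-- ===== CLAIM (what is proved, stated in full; the proofs are below) =====
def Claim_equal_solve : Prop := ∀ (G : List Int) (P : Int) (R : Int), Dom_solve G P R → Pre_solve G P R → Spec_solve G P R (solve G P R)

-- ===== LEMMAS AND PROOFS =====

-- monotonicity of a ≤-sorted list, phrased via getD as bl uses it
theorem getD_mono (a : List Int) (hs : a.Pairwise (· ≤ ·)) {i j : Nat}
    (hij : i ≤ j) (hj : j < a.length) : a.getD i 0 ≤ a.getD j 0 := by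
  rcases Nat.lt_or_ge i j with h | h
  · rw [List.getD_eq_getElem a 0 (by omega), List.getD_eq_getElem a 0 hj]
    exact List.pairwise_iff_getElem.mp hs i j (by omega) hj h
  · have : i = j := by omega
    subst this; rfl

-- the binary search returns the first position in [lo, hi) whose element is ≥ x
theorem blFuel_spec (a : List Int) (x : Int) (hs : a.Pairwise (· ≤ ·)) :
    ∀ (f lo hi : Nat), hi - lo ≤ f → lo ≤ hi → hi ≤ a.length →
      lo ≤ blFuel f a x lo hi ∧ blFuel f a x lo hi ≤ hi ∧
      (∀ j, lo ≤ j → j < blFuel f a x lo hi → a.getD j 0 < x) ∧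
      (∀ j, blFuel f a x lo hi ≤ j → j < hi → x ≤ a.getD j 0) := by
  intro f
  induction f with
  | zero =>
    intro lo hi hf hlh _
    have : lo = hi := by omega
    subst this
    simp only [blFuel]
    exact ⟨le_refl _, le_refl _, fun j h1 h2 => by omega, fun j h1 h2 => by omega⟩
  | succ f ih =>
    intro lo hi hf hlh hhi
    by_cases hlt : lo < hi
    · simp only [blFuel, if_pos hlt]
      set mid := (lo + hi) / 2 with hmid
      have hmlo : lo ≤ mid := by omega
      have hmhi : mid < hi := by omega
      by_cases hc : a.getD mid 0 < x
      · simp only [if_pos hc]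
        obtain ⟨h1, h2, h3, h4⟩ := ih (mid + 1) hi (by omega) (by omega) hhi
        refine ⟨by omega, h2, ?_, h4⟩
        intro j hj1 hj2
        rcases Nat.lt_or_ge j (mid + 1) with hj | hj
        · exact lt_of_le_of_lt (getD_mono a hs (by omega) (by omega)) hc
        · exact h3 j hj hj2
      · simp only [if_neg hc]
        obtain ⟨h1, h2, h3, h4⟩ := ih lo mid (by omega) (by omega) (by omega)
        refine ⟨h1, by omega, h3, ?_⟩
        intro j hj1 hj2
        rcases Nat.lt_or_ge j mid with hj | hj
        · exact h4 j hj1 hj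
        · exact le_trans (not_lt.mp hc) (getD_mono a hs hj (by omega))
    · simp only [blFuel, if_neg hlt]
      exact ⟨le_refl _, by omega, fun j h1 h2 => by omega, fun j h1 h2 => by omega⟩

theorem bl_spec (a : List Int) (x : Int) (hs : a.Pairwise (· ≤ ·)) :
    bl a x 0 a.length ≤ a.length ∧
    (∀ j, j < bl a x 0 a.length → a.getD j 0 < x) ∧
    (∀ j, bl a x 0 a.length ≤ j → j < a.length → x ≤ a.getD j 0) := by
  obtain ⟨h1, h2, h3, h4⟩ := blFuel_spec a x hs (a.length - 0) 0 a.length (le_refl _) (by omega) (le_refl _)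
  exact ⟨h2, fun j hj => h3 j (by omega) hj, h4⟩

-- the step function of find's loop, for stating the fold invariant
def fstep (P currP : Int) : Int × Int × Int → Int → Int × Int × Int :=
  fun s i =>
    if PySem.Int.mod (i + currP) P < s.1 then
      (PySem.Int.mod (i + currP) P, s.2.2, s.2.2 + 1)
    else (s.1, s.2.1, s.2.2 + 1)

theorem findA_eq (G : List Int) (P currP : Int) :
    findA G P currP =
      ((G.foldl (fstep P currP) (P, -1, 0)).2.1, (G.foldl (fstep P currP) (P, -1, 0)).1) := rfl

theorem fold_spec (P currP : Int) :
    ∀ (L : List Int) (b bi j0 : Int),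
      ((L.foldl (fstep P currP) (b, bi, j0)).1 ≤ b) ∧
      (∀ g ∈ L, (L.foldl (fstep P currP) (b, bi, j0)).1 ≤ PySem.Int.mod (g + currP) P) ∧
      ((L.foldl (fstep P currP) (b, bi, j0)) = (b, bi, j0 + L.length) ∨
        ∃ k : Nat, k < L.length ∧ (L.foldl (fstep P currP) (b, bi, j0)).2.1 = j0 + k ∧
          (L.foldl (fstep P currP) (b, bi, j0)).1 = PySem.Int.mod (L[k]! + currP) P) := by
  intro L
  induction L with
  | nil =>
    intro b bi j0
    refine ⟨le_refl _, by simp, Or.inl ?_⟩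
    simp
  | cons xx L' ih =>
    intro b bi j0
    by_cases hx : PySem.Int.mod (xx + currP) P < b
    · have hstep : fstep P currP (b, bi, j0) xx = (PySem.Int.mod (xx + currP) P, j0, j0 + 1) := by
        simp [fstep, hx]
      obtain ⟨h1, h2, h3⟩ := ih (PySem.Int.mod (xx + currP) P) j0 (j0 + 1)
      rw [List.foldl_cons, hstep]
      refine ⟨le_of_lt (lt_of_le_of_lt h1 hx), ?_, ?_⟩
      · intro g hg
        rcases List.mem_cons.mp hg with rfl | hg'
        · exact h1
        · exact h2 g hg'
      · rcases h3 with heq | ⟨k, hk, hidx, hval⟩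
        · refine Or.inr ⟨0, by simp, ?_, ?_⟩
          · rw [heq]; simp
          · rw [heq]; simp
        · refine Or.inr ⟨k + 1, by simp; omega, ?_, ?_⟩
          · rw [hidx]; push_cast; ring
          · rw [hval]; congr 1
    · have hstep : fstep P currP (b, bi, j0) xx = (b, bi, j0 + 1) := by
        simp [fstep, hx]
      obtain ⟨h1, h2, h3⟩ := ih b bi (j0 + 1)
      rw [List.foldl_cons, hstep]
      refine ⟨h1, ?_, ?_⟩
      · intro g hg
        rcases List.mem_cons.mp hg with rfl | hg'
        · exact le_trans h1 (not_lt.mp hx)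
        · exact h2 g hg'
      · rcases h3 with heq | ⟨k, hk, hidx, hval⟩
        · refine Or.inl ?_
          rw [heq]; simp; ring
        · refine Or.inr ⟨k + 1, by simp; omega, ?_, ?_⟩
          · rw [hidx]; push_cast; ring
          · rw [hval]; congr 1

-- find returns the index of some element minimizing (g + currP) % P
theorem findA_spec (P currP : Int) (hP : 0 < P) (G : List Int) (hG : G ≠ []) :
    ∃ (k : Nat) (_ : k < G.length),
      findA G P currP = ((k : Int), PySem.Int.mod (G[k]! + currP) P) ∧
      ∀ j, j < G.length → PySem.Int.mod (G[k]! + currP) P ≤ PySem.Int.mod (G[j]! + currP) P := by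
  obtain ⟨h1, h2, h3⟩ := fold_spec P currP G P (-1) 0
  have hGlen : 0 < G.length := List.length_pos_iff.mpr hG
  have hhead : G[0]! ∈ G := by
    rw [List.getElem!_eq_getElem?_getD, List.getElem?_eq_getElem hGlen]
    exact List.getElem_mem hGlen
  rcases h3 with heq | ⟨k, hk, hidx, hval⟩
  · exfalso
    have hb := h2 G[0]! hhead
    rw [heq] at hb
    exact absurd (lt_of_le_of_lt hb (PySem.Int.mod_lt _ hP)) (lt_irrefl _)
  · refine ⟨k, hk, ?_, ?_⟩
    · rw [findA_eq, hidx, hval]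
      norm_num
    · intro j hj
      rw [← hval]
      refine h2 G[j]! ?_
      rw [List.getElem!_eq_getElem?_getD, List.getElem?_eq_getElem hj]
      exact List.getElem_mem hj

theorem mod_shift {P : Int} (hP : 0 < P) (g c : Int) :
    PySem.Int.mod (g + c) P = PySem.Int.mod (PySem.Int.mod g P + c) P := by
  simp only [PySem.Int.mod_eq_emod_of_pos hP]
  exact (Int.emod_add_emod g P c).symm

theorem mod_inj {P : Int} (hP : 0 < P) {x y c : Int} (hx : 0 ≤ x) (hx2 : x < P)
    (hy : 0 ≤ y) (hy2 : y < P)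
    (h : PySem.Int.mod (x + c) P = PySem.Int.mod (y + c) P) : x = y := by
  rw [PySem.Int.mod_eq_emod_of_pos hP, PySem.Int.mod_eq_emod_of_pos hP] at h
  have h0 : (x - y) % P = 0 := by
    have hsub := Int.sub_emod (x + c) (y + c) P
    rw [h, sub_self, Int.zero_emod] at hsub
    have : x + c - (y + c) = x - y := by ring
    rwa [this] at hsub
  have hdvd : P ∣ (x - y) := Int.dvd_of_emod_eq_zero h0
  have := Int.eq_zero_of_abs_lt_dvd hdvd (by rw [abs_lt]; omega)
  omega

theorem mod_split {P : Int} (hP : 0 < P) {c x : Int} (hc : 0 ≤ c) (hcP : c < P)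
    (hx : 0 ≤ x) (hxP : x < P) :
    PySem.Int.mod (x + c) P = if x + c < P then x + c else x + c - P := by
  rw [PySem.Int.mod_eq_emod_of_pos hP]
  split
  · exact Int.emod_eq_of_lt (by omega) (by assumption)
  · rw [← Int.sub_emod_right (x + c) P]
    exact Int.emod_eq_of_lt (by omega) (by omega)

theorem t_val {P : Int} (hP : 0 < P) {c : Int} (hc : 0 ≤ c) (hcP : c < P) :
    PySem.Int.mod (P - c) P = if c = 0 then 0 else P - c := by
  rw [PySem.Int.mod_eq_emod_of_pos hP]
  split
  · subst_vars; simp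
  · exact Int.emod_eq_of_lt (by omega) (by omega)

theorem delSlice_eq (G : List Int) (k : Nat) (hk : k < G.length) :
    delSlice G (k : Int) = G.eraseIdx k := by
  unfold delSlice
  rw [List.eraseIdx_eq_take_drop_succ]
  have h1 : (if (k : Int) < 0 then max 0 ((G.length : Int) + k) else min (k : Int) G.length) = (k : Int) := by
    rw [if_neg (by omega)]
    omega
  have h2 : (if (k : Int) + 1 < 0 then max 0 ((G.length : Int) + k + 1) else min ((k : Int) + 1) G.length)
      = (k : Int) + 1 := by
    rw [if_neg (by omega)]
    omega
  simp only [h1, h2]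
  congr 1
  · congr 1
    omega



-- the element picked by B's successor query has the minimal residue A's scan finds,
-- and removing it from the sorted list matches removing A's pick from G
theorem key_step (P curr : Int) (hP : 0 < P) (hc0 : 0 ≤ curr) (hcP : curr < P)
    (G : List Int) (hG : G ≠ []) (k : Nat) (hk : k < G.length)
    (hmin : ∀ j, j < G.length →
      PySem.Int.mod (G[k]! + curr) P ≤ PySem.Int.mod (G[j]! + curr) P) :
    PySem.Int.mod
        ((PySem.List.sorted (G.map (fun g => PySem.Int.mod g P)) (fun x => x)).getD
          (if bl (PySem.List.sorted (G.map (fun g => PySem.Int.mod g P)) (fun x => x))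
                (PySem.Int.mod (P - curr) P) 0
                (PySem.List.sorted (G.map (fun g => PySem.Int.mod g P)) (fun x => x)).length
              = (PySem.List.sorted (G.map (fun g => PySem.Int.mod g P)) (fun x => x)).length
            then 0
            else bl (PySem.List.sorted (G.map (fun g => PySem.Int.mod g P)) (fun x => x))
                (PySem.Int.mod (P - curr) P) 0
                (PySem.List.sorted (G.map (fun g => PySem.Int.mod g P)) (fun x => x)).length) 0
          + curr) P
      = PySem.Int.mod (G[k]! + curr) P ∧
    ((PySem.List.sorted (G.map (fun g => PySem.Int.mod g P)) (fun x => x)).take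
        (if bl (PySem.List.sorted (G.map (fun g => PySem.Int.mod g P)) (fun x => x))
              (PySem.Int.mod (P - curr) P) 0
              (PySem.List.sorted (G.map (fun g => PySem.Int.mod g P)) (fun x => x)).length
            = (PySem.List.sorted (G.map (fun g => PySem.Int.mod g P)) (fun x => x)).length
          then 0
          else bl (PySem.List.sorted (G.map (fun g => PySem.Int.mod g P)) (fun x => x))
              (PySem.Int.mod (P - curr) P) 0
              (PySem.List.sorted (G.map (fun g => PySem.Int.mod g P)) (fun x => x)).length) ++
      (PySem.List.sorted (G.map (fun g => PySem.Int.mod g P)) (fun x => x)).drop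
        ((if bl (PySem.List.sorted (G.map (fun g => PySem.Int.mod g P)) (fun x => x))
              (PySem.Int.mod (P - curr) P) 0
              (PySem.List.sorted (G.map (fun g => PySem.Int.mod g P)) (fun x => x)).length
            = (PySem.List.sorted (G.map (fun g => PySem.Int.mod g P)) (fun x => x)).length
          then 0
          else bl (PySem.List.sorted (G.map (fun g => PySem.Int.mod g P)) (fun x => x))
              (PySem.Int.mod (P - curr) P) 0
              (PySem.List.sorted (G.map (fun g => PySem.Int.mod g P)) (fun x => x)).length) + 1)
      = PySem.List.sorted ((G.eraseIdx k).map (fun g => PySem.Int.mod g P)) (fun x => x)) := by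
  set mods := G.map (fun g => PySem.Int.mod g P) with hmods
  set s := PySem.List.sorted mods (fun x => x) with hsdef
  set t := PySem.Int.mod (P - curr) P with ht
  set p0 := bl s t 0 s.length with hp0def
  set pos := if p0 = s.length then 0 else p0 with hposdef
  have hperm : s.Perm mods := PySem.List.sorted_perm mods (fun x => x) false
  have hmlen : mods.length = G.length := by rw [hmods, List.length_map]
  have hslen : s.length = G.length := by rw [hperm.length_eq, hmlen]
  have hGlen : 0 < G.length := List.length_pos_iff.mpr hG
  have hpair : s.Pairwise (· ≤ ·) := by simpa using PySem.List.sorted_pairwise mods (fun x => x)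
  have hrange : ∀ x ∈ s, 0 ≤ x ∧ x < P := by
    intro x hx
    have hx' : x ∈ mods := (PySem.List.mem_sorted mods (fun x => x) false x).mp hx
    obtain ⟨g, _, rfl⟩ := List.mem_map.mp hx'
    exact ⟨PySem.Int.mod_nonneg g hP, PySem.Int.mod_lt g hP⟩
  obtain ⟨hb1, hb2, hb3⟩ := bl_spec s t hpair
  have hpos : pos < s.length := by rw [hposdef]; split <;> omega
  set m := s.getD pos 0 with hm
  have hmget : m = s[pos]'hpos := List.getD_eq_getElem s 0 hpos
  have hmmem : m ∈ s := by rw [hmget]; exact List.getElem_mem hpos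
  have hm0 : 0 ≤ m ∧ m < P := hrange m hmmem
  have htval : t = if curr = 0 then 0 else P - curr := t_val hP hc0 hcP
  -- B's pick minimizes (x + curr) % P over s
  have hminB : ∀ x ∈ s, PySem.Int.mod (m + curr) P ≤ PySem.Int.mod (x + curr) P := by
    intro x hx
    obtain ⟨j, hj, hxj⟩ := List.getElem_of_mem hx
    have hx0 : 0 ≤ x ∧ x < P := hrange x hx
    have hgj : s.getD j 0 = x := by rw [List.getD_eq_getElem s 0 hj, hxj]
    rw [mod_split hP hc0 hcP hm0.1 hm0.2, mod_split hP hc0 hcP hx0.1 hx0.2]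
    by_cases hcase : p0 = s.length
    · have hcurr : curr ≠ 0 := by
        intro h0
        have hlt := hb2 0 (by omega)
        have h00 : 0 ≤ s.getD 0 0 := by
          rw [List.getD_eq_getElem s 0 (by omega)]
          exact (hrange _ (List.getElem_mem (by omega))).1
        rw [htval, if_pos h0] at hlt
        omega
      have htv : t = P - curr := by rw [htval, if_neg hcurr]
      have hppos : pos = 0 := by rw [hposdef, if_pos hcase]
      have hmx : m ≤ x := by rw [hm, hppos, ← hgj]; exact getD_mono s hpair (by omega) hj
      have hxt : x < t := by rw [← hgj]; exact hb2 j (by omega)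
      have hmt : m < t := by rw [hm, hppos]; exact hb2 0 (by omega)
      rw [if_pos (by omega), if_pos (by omega)]
      omega
    · have hppos : pos = p0 := by rw [hposdef, if_neg hcase]
      have hp0lt : p0 < s.length := by omega
      have htm : t ≤ m := by rw [hm, hppos]; exact hb3 p0 (le_refl _) hp0lt
      rcases Nat.lt_or_ge j p0 with hjp | hjp
      · have hxt : x < t := by rw [← hgj]; exact hb2 j hjp
        have hcurr : curr ≠ 0 := by intro h0; rw [htval, if_pos h0] at hxt; omega
        have htv : t = P - curr := by rw [htval, if_neg hcurr]
        rw [if_neg (by omega), if_pos (by omega)]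
        omega
      · have hmx : m ≤ x := by rw [hm, hppos, ← hgj]; exact getD_mono s hpair hjp hj
        have hxt : t ≤ x := by rw [← hgj]; exact hb3 j (by omega) hj
        by_cases hcurr : curr = 0
        · subst hcurr; rw [if_pos (by omega), if_pos (by omega)]; omega
        · have htv : t = P - curr := by rw [htval, if_neg hcurr]
          rw [if_neg (by omega), if_neg (by omega)]
          omega
  -- bridge to A's pick
  have hGk : G[k]! = G[k]'hk := by
    rw [List.getElem!_eq_getElem?_getD, List.getElem?_eq_getElem hk]; rfl
  have hkm : k < mods.length := by omega
  have hmodsk : mods[k]'hkm = PySem.Int.mod (G[k]'hk) P := by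
    simp [hmods]
  have hmA_mem : PySem.Int.mod (G[k]'hk) P ∈ s := by
    rw [PySem.List.mem_sorted]
    exact List.mem_map.mpr ⟨G[k]'hk, List.getElem_mem hk, rfl⟩
  have hbest : PySem.Int.mod (G[k]! + curr) P
      = PySem.Int.mod (PySem.Int.mod (G[k]'hk) P + curr) P := by
    rw [hGk]; exact mod_shift hP _ _
  have hveq : PySem.Int.mod (m + curr) P = PySem.Int.mod (G[k]! + curr) P := by
    refine le_antisymm ?_ ?_
    · rw [hbest]; exact hminB _ hmA_mem
    · obtain ⟨g, hg, hgm⟩ := List.mem_map.mp ((PySem.List.mem_sorted mods (fun x => x) false m).mp hmmem)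
      obtain ⟨j, hj, hgj⟩ := List.getElem_of_mem hg
      have hGj : G[j]! = g := by
        rw [List.getElem!_eq_getElem?_getD, List.getElem?_eq_getElem hj, hgj]; rfl
      have : PySem.Int.mod (m + curr) P = PySem.Int.mod (G[j]! + curr) P := by
        rw [hGj, ← hgm]
        exact (mod_shift hP g curr).symm
      rw [this]
      exact hmin j hj
  refine ⟨hveq, ?_⟩
  -- removal alignment
  have hmeq : m = PySem.Int.mod (G[k]'hk) P := by
    refine mod_inj (c := curr) hP hm0.1 hm0.2 (PySem.Int.mod_nonneg _ hP) (PySem.Int.mod_lt _ hP) ?_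
    rw [hveq, hbest]
  have hpermerase : (mods.eraseIdx k).Perm (s.eraseIdx pos) := by
    have e1 : (mods.erase (mods[k]'hkm)).Perm (mods.eraseIdx k) := List.erase_getElem hkm
    have e2 : (mods.erase (PySem.Int.mod (G[k]'hk) P)).Perm (s.erase (PySem.Int.mod (G[k]'hk) P)) :=
      (hperm.symm).erase _
    have e3 : (s.erase (s[pos]'hpos)).Perm (s.eraseIdx pos) := List.erase_getElem hpos
    rw [hmodsk] at e1
    have e3' : (s.erase (PySem.Int.mod (G[k]'hk) P)).Perm (s.eraseIdx pos) := by
      rw [← hmeq]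
      rw [← hmget] at e3
      exact e3
    exact (e1.symm.trans e2).trans e3'
  have hpairE : (s.eraseIdx pos).Pairwise (· ≤ ·) := hpair.sublist (List.eraseIdx_sublist s pos)
  have : PySem.List.sorted ((G.eraseIdx k).map (fun g => PySem.Int.mod g P)) (fun x => x)
      = s.eraseIdx pos := by
    have hmapE : (G.eraseIdx k).map (fun g => PySem.Int.mod g P) = mods.eraseIdx k := by
      rw [hmods]; exact Eq.symm (List.eraseIdx_map _ _ _)
    rw [hmapE]
    rw [PySem.List.sorted_eq_sorted_of_perm (mods.eraseIdx k) (s.eraseIdx pos) (fun x => x)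
      (fun a b hab => hab) hpermerase]
    exact PySem.List.sorted_eq_self_of_pairwise _ _ (by simpa using hpairE)
  rw [this]
  exact (List.eraseIdx_eq_take_drop_succ s pos).symm

-- the main loop invariant: A's loop on G tracks B's loop on the sorted residues of G
theorem loop_eq (P : Int) (hP : 0 < P) :
    ∀ (n : Nat) (G : List Int) (curr total : Int), G.length = n → 0 ≤ curr → curr < P →
      solveLoopA n G P curr total =
      solveLoopB n (PySem.List.sorted (G.map (fun g => PySem.Int.mod g P)) (fun x => x)) P curr total := by
  intro n
  induction n with
  | zero => intro G curr total _ _ _; simp [solveLoopA, solveLoopB]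
  | succ n ih =>
    intro G curr total hlen hc0 hcP
    have hG : G ≠ [] := by intro h; subst h; simp at hlen
    obtain ⟨k, hk, hfind, hmin⟩ := findA_spec P curr hP G hG
    obtain ⟨hv, hrem⟩ := key_step P curr hP hc0 hcP G hG k hk hmin
    have hslen : (PySem.List.sorted (G.map fun g => PySem.Int.mod g P) (fun x => x)).length = n + 1 := by
      rw [(PySem.List.sorted_perm _ _ false).length_eq, List.length_map, hlen]
    simp only [solveLoopA, solveLoopB]
    rw [if_pos (by omega : G.length > 0), if_pos (by omega : (PySem.List.sorted (G.map fun g => PySem.Int.mod g P) (fun x => x)).length > 0)]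
    rw [hfind]
    simp only []
    rw [delSlice_eq G k hk, hv, hrem]
    refine ih (G.eraseIdx k) _ _ ?_ (PySem.Int.mod_nonneg _ hP) (PySem.Int.mod_lt _ hP)
    rw [List.length_eraseIdx]
    simp [hk]
    omega

-- ===== VERDICT (by name: the statement is the Claim_ definition above) =====
theorem solve_spec : Claim_equal_solve := by
  intro G P R _ hpre
  unfold Spec_solve solve solve_alt
  rcases hpre with hG | hP
  · subst hG; simp [solveLoopA, solveLoopB, PySem.List.sorted]
  · have h := loop_eq P hP G.length G 0 0 rfl (le_refl 0) hP
    have hlen : (PySem.List.sorted (G.map (fun g => PySem.Int.mod g P)) (fun x => x)).length = G.length := by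
      rw [(PySem.List.sorted_perm (G.map (fun g => PySem.Int.mod g P)) (fun x => x) false).length_eq, List.length_map]
    show R - solveLoopA G.length G P 0 0 =
      R - solveLoopB (PySem.List.sorted (G.map (fun g => PySem.Int.mod g P)) (fun x => x)).length
        (PySem.List.sorted (G.map (fun g => PySem.Int.mod g P)) (fun x => x)) P 0 0
    rw [h, hlen]
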